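-- pv_equiv track=rewrite | github.com/jsampson/iit-thesis | run.py | combine_branches
-- ===== SOURCE A (Python) =====
-- def combine_branches(read_bit, left_branch, right_branch):
--     if left_branch == right_branch:
--         return left_branch
--
--     result = []
--     left_sets, left_rest = extract_set_instructions(left_branch)
--     right_sets, right_rest = extract_set_instructions(right_branch)
--     for s in left_sets.copy():
--         if s in right_sets:
--             result.append(s)
--             left_sets.remove(s)
--             right_sets.remove(s)
--
--     left_branch = left_sets + left_rest
--     right_branch = right_sets + right_rest
--
--     result.append(f"SKZ #{read_bit}")
--
--     if right_branch == ["END"]: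
--         result.append("END")
--         result.extend(left_branch)
--     elif left_branch == right_branch[1:]:
--         result.extend(right_branch)
--     else:
--         offset = min(
--             (o for o in range(1, len(left_branch)-len(right_branch)+1) if right_branch == left_branch[o:]),
--             default=None
--         )
--         if offset is not None:
--             result.append(f"JMP +{offset+1}")
--             result.extend(left_branch)
--         else:
--             result.append(f"JMP +{len(left_branch)+1}")
--             result.extend(left_branch)
--             result.extend(right_branch)
--     return tuple(result)
--
-- def extract_set_instructions(instructions):
--     set_instructions = []
--     rest_instructions = []
--     in_sets = True
--     for instruction in instructions:
--         if in_sets and instruction.startswith("SET"):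
--             set_instructions.append(instruction)
--         else:
--             in_sets = False
--             rest_instructions.append(instruction)
--     return set_instructions, rest_instructions
-- ===== SOURCE B (Python) =====
-- def combine_branches(read_bit, left_branch, right_branch):
--     if left_branch == right_branch:
--         return left_branch
--     return _merge(read_bit, list(left_branch), list(right_branch), [])
--
--
-- def _find_in_set_prefix(right, s):
--     # first occurrence of s inside right's leading run of SET instructions
--     for i, ins in enumerate(right):
--         if not ins.startswith("SET"):
--             return None
--         if ins == s:
--             return i
--     return None
--
--
-- def _merge(read_bit, left, right, pending):
--     # recursively peel left's leading SET instructions: a SET matched inside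
--     # right's SET prefix is emitted and removed from right, otherwise kept in pending
--     if left and left[0].startswith("SET"):
--         s = left[0]
--         i = _find_in_set_prefix(right, s)
--         if i is not None:
--             return (s,) + _merge(read_bit, left[1:], right[:i] + right[i + 1:], pending)
--         return _merge(read_bit, left[1:], right, pending + [s])
--     return _finish(read_bit, pending + left, right)
--
--
-- def _finish(read_bit, left, right):
--     skz = f"SKZ #{read_bit}"
--     if right == ["END"]:
--         return (skz, "END") + tuple(left)
--     if left == right[1:]:
--         return (skz,) + tuple(right)
--     d = len(left) - len(right)
--     if d >= 1 and left[d:] == right: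
--         return (skz, f"JMP +{d + 1}") + tuple(left)
--     return (skz, f"JMP +{len(left) + 1}") + tuple(left) + tuple(right)
-- ===== Notes on version B (the rewrite author's own statement) =====
-- stated objective: alternative
-- what changed: B replaces A's staged passes (extract both SET prefixes, then a rescan-and-remove matching loop over copies, then a min over all candidate suffix offsets) with a single recursive pass that peels left's leading SET instructions one at a time, removing each match from the right branch in place and accumulating unmatched ones, followed by a direct suffix check at the one length-feasible offset.
import Mathlib
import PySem

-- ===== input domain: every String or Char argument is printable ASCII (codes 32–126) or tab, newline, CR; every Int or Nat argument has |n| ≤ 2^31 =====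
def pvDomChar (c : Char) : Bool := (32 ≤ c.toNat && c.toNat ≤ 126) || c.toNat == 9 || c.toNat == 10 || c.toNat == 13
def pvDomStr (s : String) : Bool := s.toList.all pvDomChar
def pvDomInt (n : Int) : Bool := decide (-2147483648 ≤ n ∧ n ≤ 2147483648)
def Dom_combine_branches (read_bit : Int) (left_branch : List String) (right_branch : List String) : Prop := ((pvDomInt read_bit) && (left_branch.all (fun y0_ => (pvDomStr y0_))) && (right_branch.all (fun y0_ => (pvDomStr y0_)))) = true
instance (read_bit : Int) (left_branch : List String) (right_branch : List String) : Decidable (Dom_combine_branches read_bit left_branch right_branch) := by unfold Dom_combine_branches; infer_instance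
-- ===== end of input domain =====

-- B replaces A's staged passes (extract SET prefixes, rescan-and-remove matching,
-- min-over-all-offsets suffix search) by a single recursive pass that peels left's
-- SET instructions one by one, removing each match from right in place, and a direct
-- suffix check (objective: alternative).

-- ===== PORT A =====
def extract_set_instructions (instructions : List String) : List String × List String :=
  let st := instructions.foldl
    (fun (st : List String × List String × Bool) instruction =>
      if st.2.2 && PySem.Str.startswith instruction "SET" then
        (st.1 ++ [instruction], st.2.1, st.2.2)
      else
        (st.1, st.2.1 ++ [instruction], false))
    ([], [], true)
  (st.1, st.2.1)

def combine_branches (read_bit : Int) (left_branch : List String) (right_branch : List String) : List String :=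
  if left_branch = right_branch then left_branch
  else
    let result : List String := []
    let le := extract_set_instructions left_branch
    let ri := extract_set_instructions right_branch
    let st := le.1.foldl
      (fun (st : List String × List String × List String) s =>
        if st.2.2.contains s then
          (st.1 ++ [s], (PySem.List.remove? st.2.1 s).getD st.2.1,
           (PySem.List.remove? st.2.2 s).getD st.2.2)
        else st)
      (result, le.1, ri.1)
    let result := st.1
    let left_branch := st.2.1 ++ le.2
    let right_branch := st.2.2 ++ ri.2
    let result := result ++ ["SKZ #" ++ PySem.Int.toStr read_bit]
    if right_branch = ["END"] then
      (result ++ ["END"]) ++ left_branch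
    else if left_branch = PySem.List.slice right_branch (some 1) none then
      result ++ right_branch
    else
      let offset := PySem.List.min?
        ((PySem.List.pyRange 1 ((left_branch.length : Int) - (right_branch.length : Int) + 1)).filter
          (fun o => right_branch == PySem.List.slice left_branch (some o) none))
        (fun x => x)
      match offset with
      | some o => (result ++ ["JMP +" ++ PySem.Int.toStr (o + 1)]) ++ left_branch
      | none =>
          ((result ++ ["JMP +" ++ PySem.Int.toStr ((left_branch.length : Int) + 1)]) ++ left_branch)
            ++ right_branch

-- ===== PORT B =====
-- Source B's _find_in_set_prefix: first occurrence of s inside right's leading SET run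
def pvFindSet? (right : List String) (s : String) : Option Nat :=
  match right with
  | [] => none
  | x :: t =>
    if !PySem.Str.startswith x "SET" then none
    else if x = s then some 0
    else (pvFindSet? t s).map (· + 1)

-- Source B's _finish: the SKZ/suffix merge of the two remaining branches
def pvFinish (read_bit : Int) (left right : List String) : List String :=
  let skz := "SKZ #" ++ PySem.Int.toStr read_bit
  if right = ["END"] then skz :: "END" :: left
  else if left = PySem.List.slice right (some 1) none then skz :: right
  else
    let d : Int := (left.length : Int) - (right.length : Int)
    if 1 ≤ d ∧ PySem.List.slice left (some d) none = right then
      skz :: ("JMP +" ++ PySem.Int.toStr (d + 1)) :: left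
    else
      skz :: ("JMP +" ++ PySem.Int.toStr ((left.length : Int) + 1)) :: (left ++ right)

-- Source B's _merge: peel left's leading SETs, removing each match from right in place
def pvMerge (read_bit : Int) (left right pending : List String) : List String :=
  match left with
  | s :: t =>
    if PySem.Str.startswith s "SET" then
      match pvFindSet? right s with
      | some i => s :: pvMerge read_bit t (right.take i ++ right.drop (i + 1)) pending
      | none => pvMerge read_bit t right (pending ++ [s])
    else pvFinish read_bit (pending ++ s :: t) right
  | [] => pvFinish read_bit pending right

def combine_branches_alt (read_bit : Int) (left_branch : List String) (right_branch : List String) : List String :=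
  if left_branch = right_branch then left_branch
  else pvMerge read_bit left_branch right_branch []

-- ===== PRECONDITION & SPEC =====
def Spec_combine_branches (read_bit : Int) (left_branch : List String) (right_branch : List String) (out : List String) : Prop := out = combine_branches_alt read_bit left_branch right_branch
instance (read_bit : Int) (left_branch : List String) (right_branch : List String) (out : List String) : Decidable (Spec_combine_branches read_bit left_branch right_branch out) := by unfold Spec_combine_branches; infer_instance

-- ===== CLAIM (what is proved, stated in full; the proofs are below) =====
def Claim_equal_combine_branches : Prop := ∀ (read_bit : Int) (left_branch : List String) (right_branch : List String), Dom_combine_branches read_bit left_branch right_branch → Spec_combine_branches read_bit left_branch right_branch (combine_branches read_bit left_branch right_branch)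

-- ===== LEMMAS AND PROOFS =====

-- the SET-prefix predicate
def pvP (s : String) : Bool := PySem.Str.startswith s "SET"

@[simp] theorem pvP_eq (s : String) : pvP s = PySem.Chars.startswith s.toList ['S', 'E', 'T'] := by
  simp [pvP]

-- reference form of the common-SET matching: walk the left sets, consuming
-- first occurrences from the right sets; returns (common, left kept, right left over)
def pvMatch : List String → List String → List String × List String × List String
  | [], rs => ([], [], rs)
  | s :: t, rs =>
    if s ∈ rs then
      let m := pvMatch t (rs.erase s)
      (s :: m.1, m.2.1, m.2.2)
    else
      let m := pvMatch t rs
      (m.1, s :: m.2.1, m.2.2)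

theorem pv_extract_false (instrs : List String) (a b : List String) :
    instrs.foldl
      (fun (st : List String × List String × Bool) instruction =>
        if st.2.2 && PySem.Str.startswith instruction "SET" then
          (st.1 ++ [instruction], st.2.1, st.2.2)
        else
          (st.1, st.2.1 ++ [instruction], false))
      (a, b, false) = (a, b ++ instrs, false) := by
  induction instrs generalizing b with
  | nil => simp
  | cons x t ih =>
    rw [List.foldl_cons]
    show List.foldl _ (if false && PySem.Str.startswith x "SET" then _ else (a, b ++ [x], false)) t = _
    rw [Bool.false_and, if_neg (by simp), ih]
    simp

theorem pv_extract_true (instrs : List String) (a b : List String) :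
    instrs.foldl
      (fun (st : List String × List String × Bool) instruction =>
        if st.2.2 && PySem.Str.startswith instruction "SET" then
          (st.1 ++ [instruction], st.2.1, st.2.2)
        else
          (st.1, st.2.1 ++ [instruction], false))
      (a, b, true) = (a ++ instrs.takeWhile pvP, b ++ instrs.dropWhile pvP, instrs.all pvP) := by
  induction instrs generalizing a with
  | nil => simp
  | cons x t ih =>
    rw [List.foldl_cons]
    show List.foldl _
      (if true && PySem.Str.startswith x "SET" then (a ++ [x], b, true) else (a, b ++ [x], false)) t = _
    rw [Bool.true_and]
    by_cases h : PySem.Str.startswith x "SET" = true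
    · rw [if_pos h, ih]
      have h2 : PySem.Chars.startswith x.toList ['S', 'E', 'T'] = true := by simpa using h
      simp [h2]
    · rw [if_neg h, pv_extract_false]
      have h' : pvP x = false := by simpa [pvP] using Bool.not_eq_true _ ▸ h
      have h2 : PySem.Chars.startswith x.toList ['S', 'E', 'T'] = false := by simpa using h'
      simp [h2]

theorem pv_extract_eq (instrs : List String) :
    extract_set_instructions instrs = (instrs.takeWhile pvP, instrs.dropWhile pvP) := by
  unfold extract_set_instructions
  rw [pv_extract_true]
  simp

-- remove the first occurrence from keep ++ s :: t when keep avoids s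
theorem pv_remove_some (keep t : List String) (s : String) (h : ∀ x ∈ keep, x ≠ s) :
    PySem.List.remove? (keep ++ s :: t) s = some (keep ++ t) := by
  induction keep with
  | nil => simp [PySem.List.remove?_cons_self]
  | cons k ks ih =>
    have hk : k ≠ s := h k (by simp)
    rw [List.cons_append, PySem.List.remove?_cons_of_ne _ hk,
      ih (fun x hx => h x (by simp [hx]))]
    simp

-- A's matching loop computes pvMatch
theorem pv_loopA (ls : List String) (rs res keep : List String) (h : ∀ x ∈ keep, x ∉ rs) :
    ls.foldl
      (fun (st : List String × List String × List String) s =>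
        if st.2.2.contains s then
          (st.1 ++ [s], (PySem.List.remove? st.2.1 s).getD st.2.1,
           (PySem.List.remove? st.2.2 s).getD st.2.2)
        else st)
      (res, keep ++ ls, rs)
    = (res ++ (pvMatch ls rs).1, keep ++ (pvMatch ls rs).2.1, (pvMatch ls rs).2.2) := by
  induction ls generalizing rs res keep with
  | nil => simp [pvMatch]
  | cons s t ih =>
    simp only [List.foldl_cons]
    by_cases hs : s ∈ rs
    · have hc : rs.contains s = true := by simpa using hs
      rw [show ((res, keep ++ s :: t, rs).2.2.contains s) = true from hc, if_pos rfl]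
      rw [pv_remove_some keep t s (fun x hx he => (h x hx) (he ▸ hs)),
        PySem.List.remove?_eq_some_erase rs s hs]
      simp only [Option.getD_some]
      rw [ih (rs.erase s) (res ++ [s]) keep
        (fun x hx hxe => h x hx (List.mem_of_mem_erase hxe))]
      simp [pvMatch, hs, List.append_assoc]
    · have hc : rs.contains s = false := by simpa using hs
      rw [show ((res, keep ++ s :: t, rs).2.2.contains s) = false from hc]
      simp only [Bool.false_eq_true, if_false]
      rw [List.append_cons, ih rs res (keep ++ [s])
        (fun x hx => by
          rcases List.mem_append.1 hx with h1 | h2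
          · exact h x h1
          · simp only [List.mem_singleton] at h2; exact h2 ▸ hs)]
      simp [pvMatch, hs, List.append_assoc]

-- B's find: s absent from the SET prefix ⇒ none
theorem pv_find_none (rs rrest : List String) (s : String)
    (hall : ∀ x ∈ rs, pvP x = true) (hh : ∀ y ∈ rrest.head?, pvP y = false)
    (hs : s ∉ rs) : pvFindSet? (rs ++ rrest) s = none := by
  induction rs with
  | nil =>
    cases rrest with
    | nil => simp [pvFindSet?]
    | cons y t =>
      have hy2 : PySem.Chars.startswith y.toList ['S', 'E', 'T'] = false := by
        simpa using hh y (by simp)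
      simp [pvFindSet?, hy2]
  | cons x t ih =>
    have hx2 : PySem.Chars.startswith x.toList ['S', 'E', 'T'] = true := by
      simpa using hall x (by simp)
    have hxs : ¬ x = s := fun he => hs (by simp [he])
    have hrec := ih (fun y hy => hall y (by simp [hy])) (fun he => hs (by simp [he]))
    simp [pvFindSet?, hx2, hxs, hrec]

-- B's find: s in the SET prefix ⇒ some index, and removing it erases s
theorem pv_find_some (rs rrest : List String) (s : String)
    (hall : ∀ x ∈ rs, pvP x = true) (hs : s ∈ rs) :
    ∃ i, pvFindSet? (rs ++ rrest) s = some i ∧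
      (rs ++ rrest).take i ++ (rs ++ rrest).drop (i + 1) = rs.erase s ++ rrest := by
  induction rs with
  | nil => cases hs
  | cons x t ih =>
    have hx2 : PySem.Chars.startswith x.toList ['S', 'E', 'T'] = true := by
      simpa using hall x (by simp)
    by_cases hxs : x = s
    · subst hxs
      refine ⟨0, ?_, ?_⟩
      · simp [pvFindSet?, hx2]
      · simp [List.erase_cons_head]
    · have hst : s ∈ t := by
        rcases List.mem_cons.1 hs with h1 | h2
        · exact absurd h1.symm hxs
        · exact h2
      obtain ⟨i, hi, hrm⟩ := ih (fun y hy => hall y (by simp [hy])) hst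
      refine ⟨i + 1, ?_, ?_⟩
      · simp [pvFindSet?, hx2, hxs, hi]
      · rw [List.cons_append, List.take_succ_cons, List.drop_succ_cons, List.cons_append, hrm,
          List.erase_cons_tail (by simp [hxs])]
        rfl

-- B's recursive merge computes pvMatch followed by pvFinish
theorem pv_merge_eq (rb : Int) (L : List String) (rs rrest pending : List String)
    (hall : ∀ x ∈ rs, pvP x = true) (hh : ∀ y ∈ rrest.head?, pvP y = false) :
    pvMerge rb L (rs ++ rrest) pending
    = (pvMatch (L.takeWhile pvP) rs).1 ++
        pvFinish rb (pending ++ (pvMatch (L.takeWhile pvP) rs).2.1 ++ L.dropWhile pvP)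
          ((pvMatch (L.takeWhile pvP) rs).2.2 ++ rrest) := by
  induction L generalizing rs pending with
  | nil => simp [pvMerge, pvMatch]
  | cons s t ih =>
    by_cases hp : pvP s = true
    · have hp' : PySem.Str.startswith s "SET" = true := by simpa [pvP] using hp
      have hp2 : PySem.Chars.startswith s.toList ['S', 'E', 'T'] = true := by simpa using hp
      rw [pvMerge, if_pos hp']
      by_cases hs : s ∈ rs
      · obtain ⟨i, hi, hrm⟩ := pv_find_some rs rrest s hall hs
        rw [hi]
        simp only
        rw [hrm, ih (rs.erase s) pending
          (fun y hy => hall y (List.mem_of_mem_erase hy))]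
        simp [pvMatch, hs, hp2]
      · rw [pv_find_none rs rrest s hall hh hs]
        simp only
        rw [ih rs (pending ++ [s]) hall]
        simp [pvMatch, hs, hp2, List.append_assoc]
    · have hp' : PySem.Str.startswith s "SET" = false := by
        simpa [pvP] using (Bool.not_eq_true _ ▸ hp)
      have hp2 : PySem.Chars.startswith s.toList ['S', 'E', 'T'] = false := by simpa using hp'
      rw [pvMerge, if_neg (by simp [hp2])]
      simp [pvMatch, hp2]

-- the min-over-offsets suffix search equals the direct length-difference check
theorem pv_offset (Lb Rb : List String) :
    PySem.List.min?
      ((PySem.List.pyRange 1 ((Lb.length : Int) - (Rb.length : Int) + 1)).filter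
        (fun o => Rb == PySem.List.slice Lb (some o) none))
      (fun x => x)
    = if 1 ≤ (Lb.length : Int) - (Rb.length : Int) ∧
         PySem.List.slice Lb (some ((Lb.length : Int) - (Rb.length : Int))) none = Rb
      then some ((Lb.length : Int) - (Rb.length : Int)) else none := by
  have hlen : ∀ o : Int, 1 ≤ o → o ≤ (Lb.length : Int) - (Rb.length : Int) →
      (Rb == PySem.List.slice Lb (some o) none) = true →
      o = (Lb.length : Int) - (Rb.length : Int) := by
    intro o h1 h2 hp
    have he : Rb = Lb.drop o.toNat := by
      have := beq_iff_eq.1 hp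
      rwa [PySem.List.slice_from Lb (by omega)] at this
    have := congrArg List.length he
    simp only [List.length_drop] at this
    omega
  by_cases hc : 1 ≤ (Lb.length : Int) - (Rb.length : Int) ∧
      PySem.List.slice Lb (some ((Lb.length : Int) - (Rb.length : Int))) none = Rb
  · rw [if_pos hc]
    rw [PySem.List.pyRange_one_succ_right (by omega), List.filter_append]
    have h1 : (PySem.List.pyRange 1 ((Lb.length : Int) - (Rb.length : Int))).filter
        (fun o => Rb == PySem.List.slice Lb (some o) none) = [] := by
      rw [List.filter_eq_nil_iff]
      intro o ho hp
      have hm := PySem.List.mem_pyRange_one.1 ho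
      have := hlen o hm.1 (by omega) hp
      omega
    have h2 : ([(Lb.length : Int) - (Rb.length : Int)] : List Int).filter
        (fun o => Rb == PySem.List.slice Lb (some o) none) = [(Lb.length : Int) - (Rb.length : Int)] := by
      simp [List.filter, hc.2]
    rw [h1, h2, List.nil_append, PySem.List.min?_id_cons]
    simp
  · rw [if_neg hc]
    have h1 : (PySem.List.pyRange 1 ((Lb.length : Int) - (Rb.length : Int) + 1)).filter
        (fun o => Rb == PySem.List.slice Lb (some o) none) = [] := by
      rw [List.filter_eq_nil_iff]
      intro o ho hp
      have hm := PySem.List.mem_pyRange_one.1 ho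
      have heq := hlen o hm.1 (by omega) hp
      apply hc
      refine ⟨by omega, ?_⟩
      rw [← heq]
      exact (beq_iff_eq.1 hp).symm
    rw [h1]
    exact (PySem.List.min?_eq_none_iff _ _).2 rfl

-- ===== VERDICT (by name: the statement is the Claim_ definition above) =====
theorem combine_branches_spec : Claim_equal_combine_branches := by
  intro rb L R _hD
  unfold Spec_combine_branches
  by_cases hLR : L = R
  · simp [combine_branches, combine_branches_alt, hLR]
  · simp only [combine_branches, combine_branches_alt, if_neg hLR, pv_extract_eq]
    have hA := pv_loopA (L.takeWhile pvP) (R.takeWhile pvP) [] [] (by simp)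
    simp only [List.nil_append] at hA
    rw [hA]
    have hRsplit : R = R.takeWhile pvP ++ R.dropWhile pvP := (List.takeWhile_append_dropWhile).symm
    have hB : pvMerge rb L R []
        = (pvMatch (L.takeWhile pvP) (R.takeWhile pvP)).1 ++
            pvFinish rb ([] ++ (pvMatch (L.takeWhile pvP) (R.takeWhile pvP)).2.1 ++ L.dropWhile pvP)
              ((pvMatch (L.takeWhile pvP) (R.takeWhile pvP)).2.2 ++ R.dropWhile pvP) := by
      conv_lhs => rw [hRsplit]
      exact pv_merge_eq rb L (R.takeWhile pvP) (R.dropWhile pvP) []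
        (fun x hx => List.mem_takeWhile_imp hx)
        (fun y hy => by
          have := List.head?_dropWhile_not pvP R
          cases hd : (R.dropWhile pvP).head? with
          | none => simp [hd] at hy
          | some z =>
            rw [hd] at hy this
            simp only [Option.mem_some_iff] at hy
            subst hy
            simpa using this)
    rw [hB]
    simp only [List.nil_append, pvFinish, pv_offset]
    set m := pvMatch (L.takeWhile pvP) (R.takeWhile pvP)
    set left' := m.2.1 ++ L.dropWhile pvP
    set right' := m.2.2 ++ R.dropWhile pvP
    by_cases h1 : right' = ["END"]
    · rw [if_pos h1, if_pos h1]; simp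
    · rw [if_neg h1, if_neg h1]
      by_cases h2 : left' = PySem.List.slice right' (some 1) none
      · rw [if_pos h2, if_pos h2]; simp
      · rw [if_neg h2, if_neg h2]
        by_cases h3 : 1 ≤ (left'.length : Int) - (right'.length : Int) ∧
            PySem.List.slice left' (some ((left'.length : Int) - (right'.length : Int))) none = right'
        · rw [if_pos h3, if_pos h3]; simp
        · rw [if_neg h3, if_neg h3]; simp
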